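-- pv_equiv track=rewrite | github.com/tomasfank/programacion-1 | previo_2024/practica3.py | mayorPar
-- ===== SOURCE A (Python) =====
-- def mayorPar(lista, mayor=-1, i=0):
--     if len(lista) == i:
--         return mayor
--     else:
--         if lista[i] % 2 == 0 and lista[i] > mayor:
--             mayor = lista[i]
--             return mayorPar(lista, mayor, i+1)
--         else:
--             return mayorPar(lista, mayor, i+1)
-- ===== SOURCE B (Python) =====
-- def mayorPar(lista, mayor=-1, i=0):
--     # Iterative scan over indices i..len-1 instead of tail recursion.
--     for j in range(i, len(lista)):
--         v = lista[j]
--         if v % 2 == 0 and v > mayor: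
--             mayor = v
--     return mayor
-- ===== Notes on version B (the rewrite author's own statement) =====
-- stated objective: idiomatic
-- what changed: Replaces the tail recursion carrying (mayor, i) with an explicit for-loop over range(i, len(lista)) updating an accumulator.
import Mathlib
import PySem

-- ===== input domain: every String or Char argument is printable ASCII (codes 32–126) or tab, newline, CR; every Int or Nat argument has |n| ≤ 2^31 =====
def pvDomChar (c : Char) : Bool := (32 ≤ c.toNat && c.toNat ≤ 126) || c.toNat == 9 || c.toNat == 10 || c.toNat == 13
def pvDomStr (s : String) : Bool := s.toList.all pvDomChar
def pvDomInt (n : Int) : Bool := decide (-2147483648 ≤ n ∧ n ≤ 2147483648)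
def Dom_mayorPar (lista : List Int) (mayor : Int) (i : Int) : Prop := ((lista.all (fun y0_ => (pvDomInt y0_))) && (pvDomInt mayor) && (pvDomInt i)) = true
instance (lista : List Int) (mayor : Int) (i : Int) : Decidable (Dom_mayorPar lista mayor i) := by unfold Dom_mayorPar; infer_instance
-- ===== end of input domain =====

-- B replaces A's tail recursion with an iterative for-loop over range(i, len(lista)); same values wherever A returns.


-- ===== PORT A =====
-- Literal port of A's tail recursion; lista[i] via pyGet? (none = IndexError, excluded by Pre_;
-- the port returns mayor there only to be total — Pre_ never admits that branch).
def mayorPar (lista : List Int) (mayor : Int) (i : Int) : Int :=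
  if (lista.length : Int) = i then mayor
  else
    match h : PySem.List.pyGet? lista i with
    | none => mayor
    | some x =>
      if PySem.Int.mod x 2 = 0 ∧ x > mayor then
        mayorPar lista x (i + 1)
      else
        mayorPar lista mayor (i + 1)
termination_by ((lista.length : Int) - i).toNat
decreasing_by
  all_goals
    have hin : PySem.Raise.InRange lista.length i := by
      by_contra hc
      rw [← PySem.List.pyGet?_eq_none_iff] at hc
      simp [hc] at h
    unfold PySem.Raise.InRange at hin
    omega

-- ===== PORT B =====
-- Port of Source B: fold over range(i, len(lista)), reading lista[j] each step.
def mayorPar_alt (lista : List Int) (mayor : Int) (i : Int) : Int :=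
  (PySem.List.pyRange i (lista.length : Int) 1).foldl
    (fun m j =>
      match PySem.List.pyGet? lista j with
      | none => m
      | some v => if PySem.Int.mod v 2 = 0 ∧ v > m then v else m)
    mayor

-- ===== PRECONDITION & SPEC =====
-- Pre_ excludes exactly the inputs where A raises IndexError: i > len(lista) (checked before the
-- equality test) and i < -len(lista) (negative index out of range).
def Pre_mayorPar (lista : List Int) (mayor : Int) (i : Int) : Prop :=
  -(lista.length : Int) ≤ i ∧ i ≤ (lista.length : Int)
instance (lista : List Int) (mayor : Int) (i : Int) : Decidable (Pre_mayorPar lista mayor i) := by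
  unfold Pre_mayorPar; infer_instance

def pvWitness_mayorPar : List Int × Int × Int := ([3, 8, 5, 2], -1, 0)

def Spec_mayorPar (lista : List Int) (mayor : Int) (i : Int) (out : Int) : Prop :=
  out = mayorPar_alt lista mayor i
instance (lista : List Int) (mayor : Int) (i : Int) (out : Int) : Decidable (Spec_mayorPar lista mayor i out) := by
  unfold Spec_mayorPar; infer_instance

-- ===== CLAIM (what is proved, stated in full; the proofs are below) =====
def Claim_equal_mayorPar : Prop := ∀ (lista : List Int) (mayor : Int) (i : Int), Dom_mayorPar lista mayor i → Pre_mayorPar lista mayor i → Spec_mayorPar lista mayor i (mayorPar lista mayor i)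

-- ===== LEMMAS AND PROOFS =====

lemma mayorPar_eq_alt (lista : List Int) :
    ∀ (n : ℕ) (mayor i : Int), ((lista.length : Int) - i).toNat = n →
      -(lista.length : Int) ≤ i → i ≤ (lista.length : Int) →
      mayorPar lista mayor i = mayorPar_alt lista mayor i := by
  intro n
  induction n with
  | zero =>
    intro mayor i hn h1 h2
    have hi : i = (lista.length : Int) := by omega
    subst hi
    rw [mayorPar, mayorPar_alt, PySem.List.pyRange_one_eq_nil le_rfl]
    simp
  | succ n ih =>
    intro mayor i hn h1 h2
    have hlt : i < (lista.length : Int) := by omega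
    have hin : PySem.Raise.InRange lista.length i := by
      unfold PySem.Raise.InRange; omega
    rw [mayorPar, mayorPar_alt, PySem.List.pyRange_one_cons hlt]
    simp only [List.foldl_cons]
    have hne : ¬ ((lista.length : Int) = i) := by omega
    rw [if_neg hne]
    split
    · rename_i heq
      rw [PySem.List.pyGet?_eq_none_iff] at heq
      exact absurd hin heq
    · rename_i x heq
      simp only [heq]
      by_cases hc : PySem.Int.mod x 2 = 0 ∧ x > mayor
      · rw [if_pos hc, if_pos hc, ih x (i + 1) (by omega) (by omega) (by omega), mayorPar_alt]
      · rw [if_neg hc, if_neg hc, ih mayor (i + 1) (by omega) (by omega) (by omega), mayorPar_alt]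

-- ===== VERDICT (by name: the statement is the Claim_ definition above) =====
theorem mayorPar_spec : Claim_equal_mayorPar := by
  intro lista mayor i _ hpre
  exact mayorPar_eq_alt lista ((lista.length : Int) - i).toNat mayor i rfl hpre.1 hpre.2
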